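-- pv_equiv track=rewrite | github.com/maroofsyyed/Duesense1 | backend/services/website_intelligence.py | _detect_sales_motion
-- ===== SOURCE A (Python) =====
-- def _detect_sales_motion(text: str) -> str:
--     plg_signals = sum(1 for s in ["free trial", "start free", "sign up", "get started", "self-serve"] if s in text)
--     sales_signals = sum(1 for s in ["request demo", "talk to sales", "contact sales", "enterprise", "custom pricing"] if s in text)
--     if plg_signals > sales_signals:
--         return "Product-Led Growth"
--     elif sales_signals > plg_signals:
--         return "Sales-Led"
--     return "Hybrid"
-- ===== SOURCE B (Python) =====
-- def _detect_sales_motion(text: str) -> str: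
--     weighted = [("free trial", 1), ("start free", 1), ("sign up", 1),
--                 ("get started", 1), ("self-serve", 1),
--                 ("request demo", -1), ("talk to sales", -1), ("contact sales", -1),
--                 ("enterprise", -1), ("custom pricing", -1)]
--     # Single left-to-right scan of the text: at each suffix, record which phrases
--     # start there (naive multi-pattern matching), instead of ten independent
--     # substring searches over the whole text.
--     found = set()
--     suffix = text
--     while suffix:
--         for phrase, _ in weighted:
--             if suffix.startswith(phrase):
--                 found.add(phrase)
--         suffix = suffix[1:]
--     score = sum(w for phrase, w in weighted if phrase in found)
--     if score > 0:
--         return "Product-Led Growth"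
--     if score < 0:
--         return "Sales-Led"
--     return "Hybrid"
-- ===== Notes on version B (the rewrite author's own statement) =====
-- stated objective: alternative
-- what changed: Instead of ten independent substring searches and a two-count comparison, B does one left-to-right scan over the text's suffixes, testing each phrase as a prefix at each position (naive multi-pattern matching) to build a found-set, then classifies by the sign of the net signed weight of the found phrases.
import Mathlib
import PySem

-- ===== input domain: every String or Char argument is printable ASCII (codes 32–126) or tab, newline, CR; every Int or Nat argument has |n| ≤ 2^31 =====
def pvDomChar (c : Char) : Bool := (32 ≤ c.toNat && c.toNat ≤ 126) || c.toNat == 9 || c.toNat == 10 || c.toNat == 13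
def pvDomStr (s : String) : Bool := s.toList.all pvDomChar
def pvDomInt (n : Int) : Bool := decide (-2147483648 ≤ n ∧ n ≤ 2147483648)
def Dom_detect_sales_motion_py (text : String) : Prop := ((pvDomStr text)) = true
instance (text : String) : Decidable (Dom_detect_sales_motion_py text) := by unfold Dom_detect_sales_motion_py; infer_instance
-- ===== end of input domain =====

-- B replaces A's ten independent whole-text substring searches by a single left-to-right scan
-- over the text's suffixes (naive multi-pattern matching into a found-set) classified by the
-- sign of the net signed weight of the found phrases (alternative decomposition, not faster).


-- ===== PORT A =====
def detect_sales_motion_py (text : String) : String :=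
  let plg_signals : Int :=
    (["free trial", "start free", "sign up", "get started", "self-serve"].foldl
      (fun acc s => if PySem.Str.isIn s text then acc + 1 else acc) 0)
  let sales_signals : Int :=
    (["request demo", "talk to sales", "contact sales", "enterprise", "custom pricing"].foldl
      (fun acc s => if PySem.Str.isIn s text then acc + 1 else acc) 0)
  if plg_signals > sales_signals then "Product-Led Growth"
  else if sales_signals > plg_signals then "Sales-Led"
  else "Hybrid"

-- ===== PORT B =====
def pvWeighted : List (String × Int) :=
  [("free trial", 1), ("start free", 1), ("sign up", 1),
   ("get started", 1), ("self-serve", 1),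
   ("request demo", -1), ("talk to sales", -1), ("contact sales", -1),
   ("enterprise", -1), ("custom pricing", -1)]

def pvCollect : List Char → PySem.Set String → PySem.Set String
  | [], found => found
  | c :: rest, found =>
      pvCollect rest
        (pvWeighted.foldl
          (fun s pw => if PySem.Chars.startswith (c :: rest) pw.1.toList then PySem.Set.add s pw.1 else s)
          found)

def detect_sales_motion_py_alt (text : String) : String :=
  let found : PySem.Set String := pvCollect text.toList PySem.Set.empty
  let score : Int :=
    pvWeighted.foldl (fun acc pw => if PySem.Set.contains found pw.1 then acc + pw.2 else acc) 0
  if score > 0 then "Product-Led Growth"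
  else if score < 0 then "Sales-Led"
  else "Hybrid"

-- ===== PRECONDITION & SPEC =====
def Spec_detect_sales_motion_py (text : String) (out : String) : Prop := out = detect_sales_motion_py_alt text
instance (text : String) (out : String) : Decidable (Spec_detect_sales_motion_py text out) := by unfold Spec_detect_sales_motion_py; infer_instance

-- ===== CLAIM (what is proved, stated in full; the proofs are below) =====
def Claim_equal_detect_sales_motion_py : Prop := ∀ (text : String), Dom_detect_sales_motion_py text → Spec_detect_sales_motion_py text (detect_sales_motion_py text)

-- ===== LEMMAS AND PROOFS =====

theorem pv_contains_add (s : PySem.Set String) (x q : String) :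
    PySem.Set.contains (PySem.Set.add s x) q = (PySem.Set.contains s q || x == q) := by
  simp only [PySem.Set.add, PySem.Set.contains]
  split_ifs with h <;> by_cases hx : x = q
  · subst hx; simp_all
  · simp_all
  · subst hx; simp_all
  · have := Ne.symm hx; simp_all

theorem pv_contains_foldl (l : List (String × Int)) (found : PySem.Set String)
    (cond : String × Int → Bool) (q : String) :
    PySem.Set.contains (l.foldl (fun s pw => if cond pw then PySem.Set.add s pw.1 else s) found) q
      = (PySem.Set.contains found q || l.any (fun pw => cond pw && pw.1 == q)) := by
  induction l generalizing found with
  | nil => simp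
  | cons x xs ih =>
      simp only [List.foldl_cons, List.any_cons, ih]
      by_cases hc : cond x = true <;> by_cases hq : x.1 = q
      · subst hq; simp [hc, pv_contains_add, Bool.or_assoc]
      · have hb : (x.1 == q) = false := by simp [hq]
        simp [hc, pv_contains_add, hb, Ne.symm hq]
      · subst hq; simp [hc]
      · simp [hc, hq]

theorem pv_any_startswith (l : List (String × Int)) (cs : List Char) (q : String) :
    l.any (fun pw => PySem.Chars.startswith cs pw.1.toList && pw.1 == q)
      = (l.any (fun pw => pw.1 == q) && PySem.Chars.startswith cs q.toList) := by
  induction l with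
  | nil => simp
  | cons x xs ih =>
      simp only [List.any_cons, ih]
      by_cases hx : x.1 = q
      · subst hx
        cases hf : PySem.Chars.startswith cs x.1.toList <;>
          cases ha : xs.any (fun pw => pw.1 == x.1) <;> simp [hf, ha]
      · have hb : (x.1 == q) = false := by simp [hx]
        simp [hb]

theorem pv_isIn_cons (sub : List Char) (c : Char) (rest : List Char) :
    PySem.Chars.isIn sub (c :: rest)
      = (PySem.Chars.startswith (c :: rest) sub || PySem.Chars.isIn sub rest) := by
  rcases h : PySem.Chars.isIn sub (c :: rest) with _ | _
  · have hn : ¬ sub <:+: c :: rest := (PySem.Chars.isIn_eq_false_iff _ _).mp h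
    have h1 : PySem.Chars.startswith (c :: rest) sub = false := by
      rcases hsw : PySem.Chars.startswith (c :: rest) sub with _ | _
      · rfl
      · exact absurd (List.IsPrefix.isInfix ((PySem.Chars.startswith_iff _ _).mp hsw)) hn
    have h2 : PySem.Chars.isIn sub rest = false := by
      rcases hr : PySem.Chars.isIn sub rest with _ | _
      · rfl
      · exact absurd (List.infix_cons_iff.mpr (Or.inr ((PySem.Chars.isIn_iff_infix _ _).mp hr))) hn
    simp [h1, h2]
  · have hi : sub <:+: c :: rest := (PySem.Chars.isIn_iff_infix _ _).mp h
    rcases List.infix_cons_iff.mp hi with hp | hinf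
    · simp [(PySem.Chars.startswith_iff _ _).mpr hp]
    · simp [(PySem.Chars.isIn_iff_infix _ _).mpr hinf]

theorem pv_contains_collect (cs : List Char) (found : PySem.Set String) (q : String) :
    PySem.Set.contains (pvCollect cs found) q
      = (PySem.Set.contains found q
          || (pvWeighted.any (fun pw => pw.1 == q) && PySem.Chars.isIn q.toList cs)) := by
  induction cs generalizing found with
  | nil =>
      rcases h : PySem.Chars.isIn q.toList ([] : List Char) with _ | _
      · simp [pvCollect, h]
      · have hq : q.toList = [] :=
          List.sublist_nil.mp (List.IsInfix.sublist ((PySem.Chars.isIn_iff_infix _ _).mp h))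
        have hq' : q = "" := String.toList_inj.mp (by simpa using hq)
        subst hq'
        have ha : pvWeighted.any (fun pw => pw.1 == "") = false := by decide
        simp [pvCollect, ha]
  | cons c rest ih =>
      simp only [pvCollect, ih, pv_contains_foldl, pv_any_startswith, pv_isIn_cons]
      cases hA : pvWeighted.any (fun pw => pw.1 == q) <;>
        cases hF : PySem.Set.contains found q <;>
          cases hS : PySem.Chars.startswith (c :: rest) q.toList <;> simp

-- ===== VERDICT (by name: the statement is the Claim_ definition above) =====
set_option maxHeartbeats 1600000 in
theorem detect_sales_motion_py_spec : Claim_equal_detect_sales_motion_py := by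
  intro text _
  unfold Spec_detect_sales_motion_py detect_sales_motion_py detect_sales_motion_py_alt
  simp only [pvWeighted, List.foldl, pv_contains_collect, PySem.Str.isIn_eq]
  simp only [List.any_cons, List.any_nil, String.reduceBEq, PySem.Set.empty,
    PySem.Set.contains, List.contains_nil, Bool.false_or, Bool.or_false, Bool.true_and]
  have h1 : ∀ (acc : Int) (b : Bool),
      (if b = true then acc + (1:Int) else acc) = acc + (if b = true then 1 else 0) := by
    intro acc b; cases b <;> simp
  have h2 : ∀ (acc : Int) (b : Bool),
      (if b = true then acc + (-1:Int) else acc) = acc + -1 * (if b = true then 1 else 0) := by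
    intro acc b; cases b <;> simp
  simp only [h1, h2, show ((0:Int)+1) = 1 from rfl]
  generalize PySem.Chars.isIn "free trial".toList text.toList = b1
  generalize PySem.Chars.isIn "start free".toList text.toList = b2
  generalize PySem.Chars.isIn "sign up".toList text.toList = b3
  generalize PySem.Chars.isIn "get started".toList text.toList = b4
  generalize PySem.Chars.isIn "self-serve".toList text.toList = b5
  generalize PySem.Chars.isIn "request demo".toList text.toList = b6
  generalize PySem.Chars.isIn "talk to sales".toList text.toList = b7
  generalize PySem.Chars.isIn "contact sales".toList text.toList = b8
  generalize PySem.Chars.isIn "enterprise".toList text.toList = b9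
  generalize PySem.Chars.isIn "custom pricing".toList text.toList = b10
  revert b1 b2 b3 b4 b5 b6 b7 b8 b9 b10
  decide
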